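-- pv_equiv track=rewrite | github.com/Melodiz/dailycode | Yandex/yandex_tex/line_reflaction.py | line_reflations
-- ===== SOURCE A (Python) =====
-- def line_reflations(points) -> bool:
--     # we need to determine if there is a line parallel to y-axis
--     # such what each point has it's mirrored pair
--     unique_points = set()
--     max_x, min_x = float('-inf'), float('inf')
--     for x, y in points:
--         max_x, min_x = max(max_x, x), min(min_x, x)
--         unique_points.add((x, y))
--     twice_x0 = min_x + max_x
--     for x, y in unique_points:
--         if (twice_x0-x, y) not in unique_points: return False
--     return True
-- ===== SOURCE B (Python) =====
-- def line_reflations(points) -> bool: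
--     # group x-coordinates by y, track global min/max x, then check each
--     # sorted group is symmetric about (min_x+max_x)/2 via a reverse zip scan
--     if not points:
--         return True
--     groups = {}
--     min_x = max_x = points[0][0]
--     for x, y in points:
--         if x < min_x:
--             min_x = x
--         if max_x < x:
--             max_x = x
--         groups.setdefault(y, set()).add(x)
--     t = min_x + max_x
--     for g in groups.values():
--         s = sorted(g)
--         if any(a + b != t for a, b in zip(s, reversed(s))):
--             return False
--     return True
-- ===== Notes on version B (the rewrite author's own statement) =====
-- stated objective: alternative
-- what changed: Replaces the global hash-set mirror-membership test per point by grouping distinct x values per y, then checking each sorted group's symmetry about min_x+max_x with a reverse-zip scan.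
import Mathlib
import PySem

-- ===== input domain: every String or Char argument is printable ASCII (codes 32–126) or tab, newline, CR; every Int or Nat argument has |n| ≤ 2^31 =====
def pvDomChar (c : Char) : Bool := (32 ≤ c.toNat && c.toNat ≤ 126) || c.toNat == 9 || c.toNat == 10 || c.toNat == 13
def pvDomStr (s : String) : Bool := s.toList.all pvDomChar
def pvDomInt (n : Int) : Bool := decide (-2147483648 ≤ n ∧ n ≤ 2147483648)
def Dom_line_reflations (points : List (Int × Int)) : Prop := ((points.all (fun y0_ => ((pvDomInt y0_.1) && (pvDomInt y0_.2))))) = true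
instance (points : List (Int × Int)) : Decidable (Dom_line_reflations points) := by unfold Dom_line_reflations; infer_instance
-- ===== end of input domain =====

-- B replaces A's per-point hash-mirror lookup by grouping x per y, sorting each
-- group and checking symmetry about min_x+max_x with a reverse-zip scan (alternative decomposition).


-- ===== PORT A =====
def line_reflations (points : List (Int × Int)) : Bool :=
  let st := points.foldl
    (fun (acc : Option Int × Option Int × PySem.Set (Int × Int)) p =>
      ((match acc.1 with | none => some p.1 | some m => some (max m p.1)),
       (match acc.2.1 with | none => some p.1 | some m => some (min m p.1)),
       PySem.Set.add acc.2.2 p))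
    (none, none, PySem.Set.empty)
  match st.1, st.2.1 with
  | some mx, some mn =>
      let t := mn + mx
      st.2.2.all (fun q => PySem.Set.contains st.2.2 (t - q.1, q.2))
  | _, _ => true

-- ===== PORT B =====
def line_reflations_alt (points : List (Int × Int)) : Bool :=
  match points with
  | [] => true
  | (x0, _) :: _ =>
    let st := points.foldl
      (fun (acc : Int × Int × PySem.Dict Int (PySem.Set Int)) p =>
        (if p.1 < acc.1 then p.1 else acc.1,
         if acc.2.1 < p.1 then p.1 else acc.2.1,
         PySem.Dict.modify acc.2.2 p.2 PySem.Set.empty (fun s => PySem.Set.add s p.1)))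
      (x0, x0, PySem.Dict.empty)
    let t := st.1 + st.2.1
    (PySem.Dict.values st.2.2).all (fun g =>
      let s := PySem.List.sorted g (fun x => x) false
      (s.zip s.reverse).all (fun ab => ab.1 + ab.2 == t))

-- ===== PRECONDITION & SPEC =====
def Spec_line_reflations (points : List (Int × Int)) (out : Bool) : Prop := out = line_reflations_alt points
instance (points : List (Int × Int)) (out : Bool) : Decidable (Spec_line_reflations points out) := by unfold Spec_line_reflations; infer_instance

-- ===== CLAIM (what is proved, stated in full; the proofs are below) =====
def Claim_equal_line_reflations : Prop := ∀ (points : List (Int × Int)), Dom_line_reflations points → Spec_line_reflations points (line_reflations points)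

-- ===== LEMMAS AND PROOFS =====

-- helper names for the proofs (used only below)
def grpStep (g : PySem.Dict Int (PySem.Set Int)) (p : Int × Int) : PySem.Dict Int (PySem.Set Int) :=
  PySem.Dict.modify g p.2 PySem.Set.empty (fun s => PySem.Set.add s p.1)

def xsOf (l : List (Int × Int)) (y : Int) : List Int :=
  (l.filter (fun p => p.2 == y)).map Prod.fst

theorem mem_xsOf (l : List (Int × Int)) (y x : Int) : x ∈ xsOf l y ↔ (x, y) ∈ l := by
  simp [xsOf, List.mem_map, List.mem_filter]

-- A's fold, closed form
theorem afold_closed (l : List (Int × Int)) : ∀ (a b : Int) (s : PySem.Set (Int × Int)),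
    l.foldl
      (fun (acc : Option Int × Option Int × PySem.Set (Int × Int)) p =>
        ((match acc.1 with | none => some p.1 | some m => some (max m p.1)),
         (match acc.2.1 with | none => some p.1 | some m => some (min m p.1)),
         PySem.Set.add acc.2.2 p))
      (some a, some b, s)
    = (some (l.foldl (fun m p => max m p.1) a), some (l.foldl (fun m p => min m p.1) b),
       l.foldl PySem.Set.add s) := by
  induction l with
  | nil => intro a b s; rfl
  | cons p l ih => intro a b s; simp only [List.foldl_cons]; exact ih _ _ _

-- B's fold, closed form
theorem bfold_closed (l : List (Int × Int)) : ∀ (mn mx : Int) (g : PySem.Dict Int (PySem.Set Int)),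
    l.foldl
      (fun (acc : Int × Int × PySem.Dict Int (PySem.Set Int)) p =>
        (if p.1 < acc.1 then p.1 else acc.1,
         if acc.2.1 < p.1 then p.1 else acc.2.1,
         PySem.Dict.modify acc.2.2 p.2 PySem.Set.empty (fun s => PySem.Set.add s p.1)))
      (mn, mx, g)
    = (l.foldl (fun m p => min m p.1) mn, l.foldl (fun m p => max m p.1) mx,
       l.foldl grpStep g) := by
  induction l with
  | nil => intro mn mx g; rfl
  | cons p l ih =>
    intro mn mx g
    simp only [List.foldl_cons]
    have h1 : (if p.1 < mn then p.1 else mn) = min mn p.1 := by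
      simp only [min_def]; split_ifs <;> omega
    have h2 : (if mx < p.1 then p.1 else mx) = max mx p.1 := by
      simp only [max_def]; split_ifs <;> omega
    rw [h1, h2]; exact ih _ _ _

-- the dict of groups: lookup
theorem grp_getD (l : List (Int × Int)) : ∀ (d : PySem.Dict Int (PySem.Set Int)) (y : Int),
    (l.foldl grpStep d).getD y PySem.Set.empty
    = (xsOf l y).foldl PySem.Set.add (d.getD y PySem.Set.empty) := by
  induction l with
  | nil => intro d y; rfl
  | cons p l ih =>
    intro d y
    simp only [List.foldl_cons]
    rw [ih]
    by_cases hy : p.2 = y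
    · subst hy
      have hx : xsOf (p :: l) p.2 = p.1 :: xsOf l p.2 := by
        simp [xsOf]
      rw [hx, List.foldl_cons]
      congr 1
      exact PySem.Dict.getD_modify_self d p.2 PySem.Set.empty _
    · have hx : xsOf (p :: l) y = xsOf l y := by
        simp [xsOf, hy]
      rw [hx]
      congr 1
      exact PySem.Dict.getD_modify_of_ne d _ _ (Ne.symm hy)

theorem grp_mem_keys (l : List (Int × Int)) : ∀ (d : PySem.Dict Int (PySem.Set Int)) (y : Int),
    y ∈ (l.foldl grpStep d).keys ↔ y ∈ d.keys ∨ y ∈ l.map Prod.snd := by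
  induction l with
  | nil => intro d y; simp
  | cons p l ih =>
    intro d y
    simp only [List.foldl_cons]
    rw [ih]
    have : y ∈ (grpStep d p).keys ↔ y = p.2 ∨ y ∈ d.keys := by
      simp [grpStep, PySem.Dict.modify, PySem.Dict.mem_keys_insert]
    rw [this]
    simp only [List.map_cons, List.mem_cons]
    tauto

theorem grp_keys_nodup (l : List (Int × Int)) : ∀ (d : PySem.Dict Int (PySem.Set Int)),
    d.keys.Nodup → (l.foldl grpStep d).keys.Nodup := by
  induction l with
  | nil => intro d h; exact h
  | cons p l ih =>
    intro d h
    simp only [List.foldl_cons]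
    exact ih _ (by
      simp only [grpStep, PySem.Dict.modify]
      exact PySem.Dict.nodup_keys_insert d _ _ h)

-- the reverse-zip scan says exactly: the reverse is the mirror image
theorem zip_all_iff_reverse_eq (L : List Int) (t : Int) :
    ((L.zip L.reverse).all (fun ab => ab.1 + ab.2 == t)) = true
      ↔ L.reverse = L.map (fun x => t - x) := by
  constructor
  · intro h
    apply List.ext_getElem (by simp)
    intro i h1 h2
    simp only [List.length_map] at h2
    have hi : i < (L.zip L.reverse).length := by
      simp only [List.length_zip, List.length_reverse]; omega
    have hm := List.all_eq_true.mp h _ (List.getElem_mem hi)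
    rw [List.getElem_zip] at hm
    simp only [beq_iff_eq] at hm
    simp only [List.getElem_map]
    omega
  · intro h
    rw [List.all_eq_true]
    intro ab hab
    obtain ⟨i, hi, rfl⟩ := List.mem_iff_getElem.mp hab
    have hi1 : i < L.length := by
      simp only [List.length_zip, List.length_reverse] at hi; omega
    rw [List.getElem_zip]
    have hrev : L.reverse[i]'(by simpa using hi1) = t - L[i]'hi1 := by
      rw [List.getElem_of_eq h, List.getElem_map]
    simp only [hrev, beq_iff_eq]
    omega

-- for a strictly increasing list: mirror-closedness = palindromic sums
theorem mirror_iff (L : List Int) (t : Int) (hpw : L.Pairwise (· < ·)) :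
    L.reverse = L.map (fun x => t - x) ↔ ∀ x ∈ L, t - x ∈ L := by
  constructor
  · intro h x hx
    have : t - x ∈ L.map (fun x => t - x) := List.mem_map_of_mem hx
    rw [← h, List.mem_reverse] at this
    exact this
  · intro h
    have hMpw : ((L.map (fun x => t - x)).reverse).Pairwise (· < ·) := by
      rw [List.pairwise_reverse, List.pairwise_map]
      exact hpw.imp (fun hab => by omega)
    have hsub : (L.map (fun x => t - x)).reverse ⊆ L := by
      intro z hz
      rw [List.mem_reverse, List.mem_map] at hz
      obtain ⟨x, hx, rfl⟩ := hz
      exact h x hx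
    have hnodupM : ((L.map (fun x => t - x)).reverse).Nodup :=
      hMpw.imp (fun hab => ne_of_lt hab)
    have hlen : L.length ≤ ((L.map (fun x => t - x)).reverse).length := by simp
    have hperm : ((L.map (fun x => t - x)).reverse).Perm L :=
      (List.subperm_of_subset hnodupM hsub).perm_of_length_le hlen
    have heq : (L.map (fun x => t - x)).reverse = L :=
      List.Perm.eq_of_pairwise (fun a b _ _ hab hba => absurd hab (lt_asymm hba)) hMpw hpw hperm
    have : L.reverse = ((L.map (fun x => t - x)).reverse).reverse := by rw [heq]
    simpa using this

-- the per-group check, in terms of raw membership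
theorem group_check (xl : List Int) (t : Int) :
    ((PySem.List.sorted (PySem.Set.ofList xl) (fun x => x) false).zip
        (PySem.List.sorted (PySem.Set.ofList xl) (fun x => x) false).reverse).all
      (fun ab => ab.1 + ab.2 == t) = true
      ↔ ∀ x ∈ xl, t - x ∈ xl := by
  have hpw : (PySem.List.sorted (PySem.Set.ofList xl) (fun x => x) false).Pairwise (· < ·) :=
    PySem.List.sorted_ofList_pairwise_lt xl
  have hmem : ∀ z, z ∈ PySem.List.sorted (PySem.Set.ofList xl) (fun x => x) false ↔ z ∈ xl := by
    intro z
    rw [PySem.List.mem_sorted, PySem.Set.mem_ofList]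
  rw [zip_all_iff_reverse_eq, mirror_iff _ _ hpw]
  constructor
  · intro h x hx
    have := h x ((hmem x).mpr hx)
    exact (hmem _).mp this
  · intro h x hx
    exact (hmem _).mpr (h x ((hmem x).mp hx))



-- A's whole fold from the (none, none, empty) start
theorem afold_all (p0 : Int × Int) (rest : List (Int × Int)) :
    (p0 :: rest).foldl
      (fun (acc : Option Int × Option Int × PySem.Set (Int × Int)) p =>
        ((match acc.1 with | none => some p.1 | some m => some (max m p.1)),
         (match acc.2.1 with | none => some p.1 | some m => some (min m p.1)),
         PySem.Set.add acc.2.2 p))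
      (none, none, PySem.Set.empty)
    = (some (rest.foldl (fun m p => max m p.1) p0.1),
       some (rest.foldl (fun m p => min m p.1) p0.1),
       PySem.Set.ofList (p0 :: rest)) := by
  rw [List.foldl_cons, afold_closed]
  rfl

-- values-all over a nodup-keyed dict = keys-all of the lookups
theorem values_all_iff_keys (G : PySem.Dict Int (PySem.Set Int)) (f : PySem.Set Int → Bool)
    (hnd : G.keys.Nodup) :
    (PySem.Dict.values G).all f = true ↔ ∀ y ∈ G.keys, f (G.getD y PySem.Set.empty) = true := by
  rw [List.all_eq_true]
  constructor
  · intro h y hy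
    simp only [PySem.Dict.keys, List.mem_map] at hy
    obtain ⟨it, hit, rfl⟩ := hy
    have hget : G.getD it.1 PySem.Set.empty = it.2 :=
      PySem.Dict.getD_of_mem_items G (by simpa using hit) hnd PySem.Set.empty
    rw [hget]
    exact h it.2 (by simp only [PySem.Dict.values, List.mem_map]; exact ⟨it, hit, rfl⟩)
  · intro h v hv
    simp only [PySem.Dict.values, List.mem_map] at hv
    obtain ⟨it, hit, rfl⟩ := hv
    have hk : it.1 ∈ G.keys := by
      simp only [PySem.Dict.keys, List.mem_map]; exact ⟨it, hit, rfl⟩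
    have hget : G.getD it.1 PySem.Set.empty = it.2 :=
      PySem.Dict.getD_of_mem_items G (by simpa using hit) hnd PySem.Set.empty
    rw [← hget]
    exact h it.1 hk

-- ===== VERDICT (by name: the statement is the Claim_ definition above) =====
theorem line_reflations_spec : Claim_equal_line_reflations := by
  unfold Claim_equal_line_reflations
  intro points _
  unfold Spec_line_reflations
  cases points with
  | nil => rfl
  | cons p0 rest =>
    obtain ⟨x0, y0⟩ := p0
    rw [Bool.eq_iff_iff]
    simp only [line_reflations, line_reflations_alt]
    rw [afold_all, List.foldl_cons, bfold_closed]
    simp only [lt_self_iff_false, if_false]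
    set t := List.foldl (fun m p => min m p.1) x0 rest + List.foldl (fun m p => max m p.1) x0 rest with ht
    have hG : List.foldl grpStep (PySem.Dict.empty.modify y0 PySem.Set.empty fun s => s.add x0) rest
        = ((x0, y0) :: rest).foldl grpStep PySem.Dict.empty := by
      rw [List.foldl_cons]; rfl
    rw [hG]
    set pts : List (Int × Int) := (x0, y0) :: rest with hpts
    set G := pts.foldl grpStep PySem.Dict.empty with hGdef
    have hnd : G.keys.Nodup := grp_keys_nodup pts PySem.Dict.empty (by
      rw [PySem.Dict.keys_empty]; exact List.nodup_nil)
    have hAiff : (List.all (PySem.Set.ofList pts) fun q =>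
        (PySem.Set.ofList pts).contains (t - q.1, q.2)) = true
          ↔ ∀ q ∈ pts, ((t - q.1, q.2) : Int × Int) ∈ pts := by
      rw [List.all_eq_true]
      constructor
      · intro h q hq
        have := h q ((PySem.Set.mem_ofList _ _).mpr hq)
        rwa [PySem.Set.contains_iff, PySem.Set.mem_ofList] at this
      · intro h q hq
        rw [PySem.Set.contains_iff, PySem.Set.mem_ofList]
        exact h q ((PySem.Set.mem_ofList _ _).mp hq)
    have hBgrp : ∀ y : Int, G.getD y PySem.Set.empty = PySem.Set.ofList (xsOf pts y) := by
      intro y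
      rw [hGdef, grp_getD]
      rfl
    rw [hAiff, values_all_iff_keys G _ hnd]
    constructor
    · intro hA y hy
      have := hBgrp y
      rw [this]
      rw [group_check]
      intro x hx
      rw [mem_xsOf] at hx
      rw [mem_xsOf]
      exact hA (x, y) hx
    · intro hB q hq
      obtain ⟨x, y⟩ := q
      have hy : y ∈ G.keys := by
        rw [hGdef, grp_mem_keys]
        right
        simpa using List.mem_map_of_mem (f := Prod.snd) hq
      have hchk := hB y hy
      rw [hBgrp y, group_check] at hchk
      have := hchk x (by rw [mem_xsOf]; exact hq)
      rwa [mem_xsOf] at this
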